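-- pv_equiv track=rewrite | github.com/aaalfran/indiceDocumentos | functions.py | logica
-- ===== SOURCE A (Python) =====
-- def logica(a, b):
--     if len(a) > 2:
--         if b[0] == "and":
--             resultado = a[0] and a[1]
--         if b[0] == "or":
--             resultado = a[0] or a[1]
--         b = b[1:]
--         index = 2
--         for element in b:
--             if element == "and":
--                 resultado = resultado and a[index]
--             if element == "or":
--                 resultado = resultado or a[index]
--             index = index + 1
--     elif (len(a) == 2):
--         if b[0] == "and":
--             resultado = a[0] and a[1]
--         if b[0] == "or":
--             resultado = a[0] or a[1]
--     else:
--         resultado = a[0]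
--     return resultado
-- ===== SOURCE B (Python) =====
-- def logica(a, b):
--     # Evaluate the left-to-right and/or chain: the mandatory first application
--     # b[0] of a[0], a[1] gives the base value (unknown first operator -> KeyError,
--     # as the chain is undefined without it); every later step is either the
--     # identity ('and' True / 'or' False / unrecognized operator) or forces a
--     # constant ('and' False -> False, 'or' True -> True), so the answer is the
--     # constant of the LAST forcing pair, found by one right-to-left scan, else
--     # the base value.
--     if len(a) < 2:
--         return a[0]
--     base = {"and": a[0] and a[1], "or": a[0] or a[1]}[b[0]]
--     n = min(len(b), len(a) - 1)
--     for i in range(n - 1, 0, -1):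
--         if b[i] == "and" and not a[i + 1]:
--             return False
--         if b[i] == "or" and a[i + 1]:
--             return True
--     return base
-- ===== Notes on version B (the rewrite author's own statement) =====
-- stated objective: alternative
-- what changed: Replaces A's left-to-right accumulator fold with its len(a)-based branching and manual index counter by a dict-dispatched base value for the mandatory first application plus a single right-to-left scan of the remaining paired (operator, operand) region that returns at the last absorbing step ('and' with a False operand gives False, 'or' with a True operand gives True); correct because every non-absorbing step of the fold is the identity on the accumulator.
import Mathlib
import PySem

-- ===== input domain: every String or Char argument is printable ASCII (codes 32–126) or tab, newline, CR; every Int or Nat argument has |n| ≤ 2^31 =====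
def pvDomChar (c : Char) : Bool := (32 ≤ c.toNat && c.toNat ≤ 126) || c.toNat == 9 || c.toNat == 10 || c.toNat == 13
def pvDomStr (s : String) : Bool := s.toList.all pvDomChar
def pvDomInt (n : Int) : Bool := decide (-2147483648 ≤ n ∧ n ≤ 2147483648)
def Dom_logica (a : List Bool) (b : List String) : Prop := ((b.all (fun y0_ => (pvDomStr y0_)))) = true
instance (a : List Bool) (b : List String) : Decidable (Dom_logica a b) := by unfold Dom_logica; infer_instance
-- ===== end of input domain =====

-- B replaces A's left-to-right accumulator fold (with len(a)-branching and a manual index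
-- counter) by a dict-dispatched base value for the mandatory first application plus one
-- right-to-left scan of the remaining paired (operator, operand) region that stops at the last
-- absorbing step and otherwise falls back to the base; alternative algorithm, same cost.


-- ===== PORT A =====
-- A's 'for element in b: …; index = index + 1' loop (reached only when len(a) > 2);
-- a[index] via total pyGetD: under Pre_ every evaluated access is in range, and where Python
-- short-circuits the access the && / || value is the short-circuited 'resultado' either way
def logicaLoopA (a : List Bool) : List String → Nat → Bool → Bool
  | [], _, resultado => resultado
  | element :: rest, index, resultado =>
    let r1 := if element = "and" then resultado && PySem.List.pyGetD a (index : Int) false else resultado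
    let r2 := if element = "or" then r1 || PySem.List.pyGetD a (index : Int) false else r1
    logicaLoopA a rest (index + 1) r2

def logica (a : List Bool) (b : List String) : Bool :=
  if 2 < a.length then
    let r0 : Bool := false  -- 'resultado' unbound in Python when neither branch below fires (outside Pre_)
    let r1 := if PySem.List.pyGetD b 0 "" = "and" then PySem.List.pyGetD a 0 false && PySem.List.pyGetD a 1 false else r0
    let r2 := if PySem.List.pyGetD b 0 "" = "or" then PySem.List.pyGetD a 0 false || PySem.List.pyGetD a 1 false else r1
    logicaLoopA a (PySem.List.slice b (some 1) none) 2 r2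
  else if a.length = 2 then
    let r0 : Bool := false  -- same unbound case (outside Pre_)
    let r1 := if PySem.List.pyGetD b 0 "" = "and" then PySem.List.pyGetD a 0 false && PySem.List.pyGetD a 1 false else r0
    let r2 := if PySem.List.pyGetD b 0 "" = "or" then PySem.List.pyGetD a 0 false || PySem.List.pyGetD a 1 false else r1
    r2
  else
    PySem.List.pyGetD a 0 false

-- ===== PORT B =====
-- B's 'for i in range(n - 1, 0, -1)' downward scan as structural recursion: logicaScanB a b
-- base k runs the loop body for i = k, k-1, ..., 1 and falls back to the dict-dispatched base
-- value; b[i] / a[i+1] via total pyGetD (in range for every index reached under Pre_).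
-- n = min(len(b), len(a) - 1) uses Nat subtraction: exact for the len(a) >= 2 inputs reaching it.
def logicaScanB (a : List Bool) (b : List String) (base : Bool) : Nat → Bool
  | 0 => base
  | k + 1 =>
    if PySem.List.pyGetD b ((k + 1 : Nat) : Int) "" = "and" ∧
        PySem.List.pyGetD a (((k + 1 : Nat) : Int) + 1) false = false then false
    else if PySem.List.pyGetD b ((k + 1 : Nat) : Int) "" = "or" ∧
        PySem.List.pyGetD a (((k + 1 : Nat) : Int) + 1) false = true then true
    else logicaScanB a b base k

def logica_alt (a : List Bool) (b : List String) : Bool :=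
  if a.length < 2 then PySem.List.pyGetD a 0 false
  else
    -- {"and": a[0] and a[1], "or": a[0] or a[1]}[b[0]]: the KeyError / IndexError of this
    -- lookup lies outside Pre_, so the total getD default is never the value returned there
    let base := ((PySem.Dict.ofList
        [("and", PySem.List.pyGetD a 0 false && PySem.List.pyGetD a 1 false),
         ("or", PySem.List.pyGetD a 0 false || PySem.List.pyGetD a 1 false)]).get?
      (PySem.List.pyGetD b 0 "")).getD false
    logicaScanB a b base (min b.length (a.length - 1) - 1)

-- ===== PRECONDITION & SPEC =====
-- Pre_ holds exactly where Python A returns normally; it excludes only inputs on which A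
-- raises: empty a (IndexError), a missing or unrecognized first operator when len(a) >= 2
-- (IndexError / UnboundLocalError), and - for len(a) > 2 - operator lists with an 'and'/'or'
-- past the last paired operand that the running value does not short-circuit (IndexError).
-- The disjuncts of the third conjunct spell the short-circuit shapes out: no recognized
-- trailing operator at all, a monotone all-True / all-False chain from a[0], or a deciding
-- 'or'-True / 'and'-False step after which no opposite unshielded operator occurs.
def Pre_logica (a : List Bool) (b : List String) : Prop :=
  a ≠ [] ∧ (2 ≤ a.length → b ≠ [] ∧ (b.headD "" = "and" ∨ b.headD "" = "or")) ∧
    (2 < a.length →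
      ((∀ s ∈ b.drop (a.length - 1), s ≠ "and" ∧ s ≠ "or")
       ∨ (a.headD false = true ∧
           ∀ j (hj : j < b.length), b[j] = "and" → ∃ h : j + 1 < a.length, a[j + 1] = true)
       ∨ (a.headD false = false ∧
           ∀ j (hj : j < b.length), b[j] = "or" → ∃ h : j + 1 < a.length, a[j + 1] = false)
       ∨ (∃ j, ∃ hj : j < b.length, b[j] = "or" ∧ (∃ h : j + 1 < a.length, a[j + 1] = true) ∧
           ∀ k (hk : k < b.length), j < k → b[k] = "and" → ∃ h : k + 1 < a.length, a[k + 1] = true)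
       ∨ (∃ j, ∃ hj : j < b.length, b[j] = "and" ∧ (∃ h : j + 1 < a.length, a[j + 1] = false) ∧
           ∀ k (hk : k < b.length), j < k → b[k] = "or" → ∃ h : k + 1 < a.length, a[k + 1] = false)))
instance (a : List Bool) (b : List String) : Decidable (Pre_logica a b) := by
  unfold Pre_logica; infer_instance

def pvWitness_logica : List Bool × List String := ([true, false, true], ["and", "or"])

def Spec_logica (a : List Bool) (b : List String) (out : Bool) : Prop := out = logica_alt a b
instance (a : List Bool) (b : List String) (out : Bool) : Decidable (Spec_logica a b out) := by unfold Spec_logica; infer_instance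

-- ===== CLAIM (what is proved, stated in full; the proofs are below) =====
def Claim_equal_logica : Prop := ∀ (a : List Bool) (b : List String), Dom_logica a b → Pre_logica a b → Spec_logica a b (logica a b)

-- ===== LEMMAS AND PROOFS =====

-- one step of the left-to-right chain on a paired (operator, operand)
def pvStep (r : Bool) (p : String × Bool) : Bool :=
  if p.1 = "and" then r && p.2 else if p.1 = "or" then r || p.2 else r

-- proof-side reference scan: like B's loop but running down to index 0 with fallback a[0]
def pvScanRef (a : List Bool) (b : List String) : Nat → Bool
  | 0 => PySem.List.pyGetD a 0 false
  | i + 1 =>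
    if PySem.List.pyGetD b (i : Int) "" = "and" ∧
        PySem.List.pyGetD a ((i : Int) + 1) false = false then false
    else if PySem.List.pyGetD b (i : Int) "" = "or" ∧
        PySem.List.pyGetD a ((i : Int) + 1) false = true then true
    else pvScanRef a b i

-- B's scan with base = the reference scan's value at 1 IS the reference scan shifted by one
theorem scanB_eq_ref (a : List Bool) (b : List String) (base : Bool)
    (hbase : base = pvScanRef a b 1) :
    ∀ k, logicaScanB a b base k = pvScanRef a b (k + 1) := by
  intro k
  induction k with
  | zero => simpa [logicaScanB] using hbase
  | succ k ih =>
    conv_rhs => rw [pvScanRef]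
    simp only [logicaScanB]
    rw [ih]

-- A's loop over ops starting at a-index i is the left fold of pvStep over the pairs, as long
-- as every accessed index is in range
theorem loopA_eq_foldl (a : List Bool) (ops : List String) (i : Nat) (r : Bool)
    (h : i + ops.length ≤ a.length) :
    logicaLoopA a ops i r = List.foldl pvStep r (ops.zip (a.drop i)) := by
  induction ops generalizing i r with
  | nil => rfl
  | cons el rest ih =>
    have hi : i < a.length := by simp at h; omega
    have hdrop : a.drop i = a[i] :: a.drop (i + 1) := by
      rw [List.drop_eq_getElem_cons hi]
    have hget : PySem.List.pyGetD a (i : Int) false = a[i] := by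
      rw [PySem.List.pyGetD_natCast, List.getD_eq_getElem _ _ hi]
    simp only [logicaLoopA, hdrop, List.zip_cons_cons, List.foldl_cons, hget]
    rw [ih (i + 1) _ (by simp at h ⊢; omega)]
    congr 1
    by_cases h1 : el = "and" <;> by_cases h2 : el = "or" <;>
      simp_all [pvStep]

-- A's loop is the identity when no listed operator is recognized
theorem loopA_id (a : List Bool) (ops : List String) (i : Nat) (r : Bool)
    (h : ∀ s ∈ ops, s ≠ "and" ∧ s ≠ "or") :
    logicaLoopA a ops i r = r := by
  induction ops generalizing i r with
  | nil => rfl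
  | cons el rest ih =>
    obtain ⟨h1, h2⟩ := h el (by simp)
    simp only [logicaLoopA, if_neg h1, if_neg h2]
    exact ih _ _ (fun s hs => h s (by simp [hs]))

-- A's loop over an append runs the two pieces in sequence
theorem loopA_append (a : List Bool) (l1 l2 : List String) (i : Nat) (r : Bool) :
    logicaLoopA a (l1 ++ l2) i r = logicaLoopA a l2 (i + l1.length) (logicaLoopA a l1 i r) := by
  induction l1 generalizing i r with
  | nil => simp [logicaLoopA]
  | cons el rest ih =>
    simp only [List.cons_append, logicaLoopA, ih, List.length_cons]
    congr 1
    omega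

-- appending one element to the shorter side of a zip
theorem zip_concat {α β : Type} (xs : List α) (x : α) (ys : List β)
    (h : xs.length < ys.length) :
    (xs ++ [x]).zip ys = xs.zip ys ++ [(x, ys[xs.length])] := by
  induction xs generalizing ys with
  | nil =>
    match ys with
    | y :: ys' => simp
  | cons a' xs' ih =>
    match ys with
    | y :: ys' =>
      simp only [List.cons_append, List.zip_cons_cons, List.cons.injEq, true_and]
      have := ih ys' (by simpa using h)
      simpa using this

-- B's downward scan to bound n computes the left fold of pvStep over the first n pairs,
-- starting from a[0]
theorem scanB_eq_foldl (a : List Bool) (b : List String) (n : Nat)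
    (hb : n ≤ b.length) (ha : n < a.length) :
    pvScanRef a b n =
      List.foldl pvStep (PySem.List.pyGetD a 0 false) ((b.take n).zip (a.drop 1)) := by
  induction n with
  | zero => simp [pvScanRef]
  | succ n ih =>
    have hbn : n < b.length := by omega
    have han1 : n + 1 < a.length := ha
    have htake : b.take (n + 1) = b.take n ++ [b[n]] := by
      rw [List.take_succ, List.getElem?_eq_getElem hbn]; rfl
    have hlen : (b.take n).length < (a.drop 1).length := by
      simp [List.length_take, List.length_drop]; omega
    have hgetlen : (b.take n).length = n := by simp [List.length_take]; omega
    have hdropget : (a.drop 1)[(b.take n).length] = a[n + 1] := by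
      have : (a.drop 1)[(b.take n).length]'hlen = a[1 + (b.take n).length] := by
        rw [List.getElem_drop]
      rw [this]; congr 1; omega
    rw [htake, zip_concat _ _ _ hlen, List.foldl_append, hdropget]
    have hgb : PySem.List.pyGetD b (n : Int) "" = b[n] := by
      rw [PySem.List.pyGetD_natCast, List.getD_eq_getElem _ _ hbn]
    have hga : PySem.List.pyGetD a ((n : Int) + 1) false = a[n + 1] := by
      have : ((n : Int) + 1) = ((n + 1 : Nat) : Int) := by push_cast; ring
      rw [this, PySem.List.pyGetD_natCast, List.getD_eq_getElem _ _ han1]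
    simp only [pvScanRef, hgb, hga, ih (by omega) (by omega)]
    by_cases h1 : b[n] = "and" <;> by_cases hv : a[n + 1] <;>
      simp_all [pvStep, List.foldl_cons]

-- A's loop started with a True accumulator stays True when every listed 'and' has a True
-- operand at its index (an 'or' short-circuits, other operators are skipped)
theorem loopA_true (a : List Bool) (ops : List String) (i : Nat)
    (h : ∀ k (hk : k < ops.length), ops[k] = "and" →
        PySem.List.pyGetD a ((i + k : Nat) : Int) false = true) :
    logicaLoopA a ops i true = true := by
  induction ops generalizing i with
  | nil => rfl
  | cons el rest ih =>
    have h0 := h 0 (by simp)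
    simp only [List.getElem_cons_zero, Nat.add_zero] at h0
    simp only [logicaLoopA]
    have hstep : (if el = "or" then
        (if el = "and" then true && PySem.List.pyGetD a (i : Int) false else true) ||
          PySem.List.pyGetD a (i : Int) false
      else if el = "and" then true && PySem.List.pyGetD a (i : Int) false else true) = true := by
      by_cases h1 : el = "and"
      · simp [h1, h0 h1]
      · by_cases h2 : el = "or" <;> simp [h1, h2]
    rw [hstep]
    refine ih (i + 1) (fun k hk hek => ?_)
    have := h (k + 1) (by simpa using Nat.succ_lt_succ hk) (by simpa using hek)
    have hcast : i + 1 + k = i + (k + 1) := by omega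
    rw [hcast]
    exact this

-- and dually: a False accumulator stays False when every listed 'or' has a False operand
theorem loopA_false (a : List Bool) (ops : List String) (i : Nat)
    (h : ∀ k (hk : k < ops.length), ops[k] = "or" →
        PySem.List.pyGetD a ((i + k : Nat) : Int) false = false) :
    logicaLoopA a ops i false = false := by
  induction ops generalizing i with
  | nil => rfl
  | cons el rest ih =>
    have h0 := h 0 (by simp)
    simp only [List.getElem_cons_zero, Nat.add_zero] at h0
    simp only [logicaLoopA]
    have hstep : (if el = "or" then
        (if el = "and" then false && PySem.List.pyGetD a (i : Int) false else false) ||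
          PySem.List.pyGetD a (i : Int) false
      else if el = "and" then false && PySem.List.pyGetD a (i : Int) false else false) = false := by
      by_cases h2 : el = "or"
      · simp [h2, h0 h2]
      · by_cases h1 : el = "and" <;> simp [h1, h2]
    rw [hstep]
    refine ih (i + 1) (fun k hk hek => ?_)
    have := h (k + 1) (by simpa using Nat.succ_lt_succ hk) (by simpa using hek)
    have hcast : i + 1 + k = i + (k + 1) := by omega
    rw [hcast]
    exact this

-- B's scan returns True from a True a[0] when every 'and' in b has a True operand
theorem scanB_true (a : List Bool) (b : List String)
    (ha0 : PySem.List.pyGetD a 0 false = true)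
    (h : ∀ i : Nat, i < b.length → PySem.List.pyGetD b (i : Int) "" = "and" →
        PySem.List.pyGetD a ((i : Int) + 1) false = true) :
    ∀ m, m ≤ b.length → pvScanRef a b m = true := by
  intro m
  induction m with
  | zero => intro _; simpa [pvScanRef] using ha0
  | succ i ih =>
    intro hm
    simp only [pvScanRef]
    split_ifs with h1 h2
    · rw [h i (by omega) h1.1] at h1
      exact absurd h1.2 (by simp)
    · rfl
    · exact ih (by omega)

-- and dually: the scan returns False from a False a[0] when every 'or' has a False operand
theorem scanB_false (a : List Bool) (b : List String)
    (ha0 : PySem.List.pyGetD a 0 false = false)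
    (h : ∀ i : Nat, i < b.length → PySem.List.pyGetD b (i : Int) "" = "or" →
        PySem.List.pyGetD a ((i : Int) + 1) false = false) :
    ∀ m, m ≤ b.length → pvScanRef a b m = false := by
  intro m
  induction m with
  | zero => intro _; simpa [pvScanRef] using ha0
  | succ i ih =>
    intro hm
    simp only [pvScanRef]
    split_ifs with h1 h2
    · rfl
    · rw [h i (by omega) h2.1] at h2
      exact absurd h2.2 (by simp)
    · exact ih (by omega)

-- definitional unfolding of one step of A's loop (kept as a lemma so rewrites match exactly)
theorem loopA_cons (a : List Bool) (el : String) (rest : List String) (i : Nat) (r : Bool) :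
    logicaLoopA a (el :: rest) i r = logicaLoopA a rest (i + 1)
      (if el = "or" then
        (if el = "and" then r && PySem.List.pyGetD a (i : Int) false else r) ||
          PySem.List.pyGetD a (i : Int) false
      else if el = "and" then r && PySem.List.pyGetD a (i : Int) false else r) := rfl

-- A's loop ends True from ANY accumulator once some listed 'or' has a True operand and no
-- later 'and' lacks a True operand (the steps before the anchor are irrelevant)
theorem loopA_ev_true (a : List Bool) (ops : List String) (i : Nat) (k0 : Nat)
    (hk0 : k0 < ops.length) (hor : ops[k0] = "or")
    (hval : PySem.List.pyGetD a ((i + k0 : Nat) : Int) false = true)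
    (hafter : ∀ k (hk : k < ops.length), k0 < k → ops[k] = "and" →
        PySem.List.pyGetD a ((i + k : Nat) : Int) false = true)
    (r : Bool) : logicaLoopA a ops i r = true := by
  induction ops generalizing i k0 r with
  | nil => simp at hk0
  | cons el rest ih =>
    cases k0 with
    | zero =>
      simp only [List.getElem_cons_zero] at hor
      subst hor
      simp only [Nat.add_zero] at hval
      rw [loopA_cons]
      have hbody : (if ("or" : String) = "or" then
          (if ("or" : String) = "and" then r && PySem.List.pyGetD a (i : Int) false else r) ||
            PySem.List.pyGetD a (i : Int) false
        else if ("or" : String) = "and" then r && PySem.List.pyGetD a (i : Int) false else r) =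
          true := by simp [hval]
      rw [hbody]
      refine loopA_true a rest (i + 1) (fun k hk hek => ?_)
      have := hafter (k + 1) (by simpa using Nat.succ_lt_succ hk) (by omega) (by simpa using hek)
      have hcast : i + (k + 1) = i + 1 + k := by omega
      rw [hcast] at this
      exact this
    | succ k0' =>
      simp only [List.getElem_cons_succ] at hor
      have hcast : i + (k0' + 1) = i + 1 + k0' := by omega
      rw [hcast] at hval
      simp only [logicaLoopA]
      refine ih (i + 1) k0' (by simpa using hk0) hor hval (fun k hk hlt hek => ?_) _
      have := hafter (k + 1) (by simpa using Nat.succ_lt_succ hk) (by omega) (by simpa using hek)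
      have hcast2 : i + (k + 1) = i + 1 + k := by omega
      rw [hcast2] at this
      exact this

-- and dually: the loop ends False once some listed 'and' has a False operand and no later
-- 'or' lacks a False operand
theorem loopA_ev_false (a : List Bool) (ops : List String) (i : Nat) (k0 : Nat)
    (hk0 : k0 < ops.length) (hand : ops[k0] = "and")
    (hval : PySem.List.pyGetD a ((i + k0 : Nat) : Int) false = false)
    (hafter : ∀ k (hk : k < ops.length), k0 < k → ops[k] = "or" →
        PySem.List.pyGetD a ((i + k : Nat) : Int) false = false)
    (r : Bool) : logicaLoopA a ops i r = false := by
  induction ops generalizing i k0 r with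
  | nil => simp at hk0
  | cons el rest ih =>
    cases k0 with
    | zero =>
      simp only [List.getElem_cons_zero] at hand
      subst hand
      simp only [Nat.add_zero] at hval
      rw [loopA_cons]
      have hbody : (if ("and" : String) = "or" then
          (if ("and" : String) = "and" then r && PySem.List.pyGetD a (i : Int) false else r) ||
            PySem.List.pyGetD a (i : Int) false
        else if ("and" : String) = "and" then r && PySem.List.pyGetD a (i : Int) false else r) =
          false := by simp [hval]
      rw [hbody]
      refine loopA_false a rest (i + 1) (fun k hk hek => ?_)
      have := hafter (k + 1) (by simpa using Nat.succ_lt_succ hk) (by omega) (by simpa using hek)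
      have hcast : i + (k + 1) = i + 1 + k := by omega
      rw [hcast] at this
      exact this
    | succ k0' =>
      simp only [List.getElem_cons_succ] at hand
      have hcast : i + (k0' + 1) = i + 1 + k0' := by omega
      rw [hcast] at hval
      simp only [logicaLoopA]
      refine ih (i + 1) k0' (by simpa using hk0) hand hval (fun k hk hlt hek => ?_) _
      have := hafter (k + 1) (by simpa using Nat.succ_lt_succ hk) (by omega) (by simpa using hek)
      have hcast2 : i + (k + 1) = i + 1 + k := by omega
      rw [hcast2] at this
      exact this

-- B's scan returns True past a deciding 'or'-True pair shielded on its right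
theorem scanB_ev_true (a : List Bool) (b : List String) (j : Nat) (hj : j < b.length)
    (hor : b[j] = "or") (hja : j + 1 < a.length) (hav : a[j + 1] = true)
    (h : ∀ k (hk : k < b.length), j < k → b[k] = "and" → ∃ h : k + 1 < a.length, a[k + 1] = true) :
    ∀ m, j < m → m ≤ b.length → pvScanRef a b m = true := by
  intro m
  induction m with
  | zero => omega
  | succ i ih =>
    intro hji hm
    have hib : i < b.length := by omega
    have hgb : PySem.List.pyGetD b (i : Int) "" = b[i] := by
      rw [PySem.List.pyGetD_natCast, List.getD_eq_getElem _ _ hib]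
    simp only [pvScanRef]
    split_ifs with h1 h2
    · by_cases hij : i = j
      · subst hij
        rw [hgb, hor] at h1
        simpa using h1.1
      · obtain ⟨hlt, hval⟩ := h i hib (by omega) (by rw [hgb] at h1; exact h1.1)
        have hga : PySem.List.pyGetD a ((i : Int) + 1) false = a[i + 1] := by
          have hc : ((i : Int) + 1) = ((i + 1 : Nat) : Int) := by push_cast; ring
          rw [hc, PySem.List.pyGetD_natCast, List.getD_eq_getElem _ _ hlt]
        rw [hga, hval] at h1
        simpa using h1.2
    · rfl
    · by_cases hij : i = j
      · subst hij
        have hga : PySem.List.pyGetD a ((i : Int) + 1) false = a[i + 1] := by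
          have hc : ((i : Int) + 1) = ((i + 1 : Nat) : Int) := by push_cast; ring
          rw [hc, PySem.List.pyGetD_natCast, List.getD_eq_getElem _ _ hja]
        exact absurd ⟨by rw [hgb, hor], by rw [hga, hav]⟩ h2
      · exact ih (by omega) (by omega)

-- and dually: the scan returns False past a deciding 'and'-False pair shielded on its right
theorem scanB_ev_false (a : List Bool) (b : List String) (j : Nat) (hj : j < b.length)
    (hand : b[j] = "and") (hja : j + 1 < a.length) (hav : a[j + 1] = false)
    (h : ∀ k (hk : k < b.length), j < k → b[k] = "or" → ∃ h : k + 1 < a.length, a[k + 1] = false) :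
    ∀ m, j < m → m ≤ b.length → pvScanRef a b m = false := by
  intro m
  induction m with
  | zero => omega
  | succ i ih =>
    intro hji hm
    have hib : i < b.length := by omega
    have hgb : PySem.List.pyGetD b (i : Int) "" = b[i] := by
      rw [PySem.List.pyGetD_natCast, List.getD_eq_getElem _ _ hib]
    simp only [pvScanRef]
    split_ifs with h1 h2
    · rfl
    · by_cases hij : i = j
      · subst hij
        rw [hgb, hand] at h2
        simpa using h2.1
      · obtain ⟨hlt, hval⟩ := h i hib (by omega) (by rw [hgb] at h2; exact h2.1)
        have hga : PySem.List.pyGetD a ((i : Int) + 1) false = a[i + 1] := by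
          have hc : ((i : Int) + 1) = ((i + 1 : Nat) : Int) := by push_cast; ring
          rw [hc, PySem.List.pyGetD_natCast, List.getD_eq_getElem _ _ hlt]
        rw [hga, hval] at h2
        simpa using h2.2
    · by_cases hij : i = j
      · subst hij
        have hga : PySem.List.pyGetD a ((i : Int) + 1) false = a[i + 1] := by
          have hc : ((i : Int) + 1) = ((i + 1 : Nat) : Int) := by push_cast; ring
          rw [hc, PySem.List.pyGetD_natCast, List.getD_eq_getElem _ _ hja]
        exact absurd ⟨by rw [hgb, hand], by rw [hga, hav]⟩ h1
      · exact ih (by omega) (by omega)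

-- ===== VERDICT (by name: the statement is the Claim_ definition above) =====
set_option maxHeartbeats 2000000 in
theorem logica_spec : Claim_equal_logica := by
  intro a b _ hpre
  unfold Spec_logica
  obtain ⟨hne, h2, hC⟩ := hpre
  match a, b with
  | [], _ => exact absurd rfl hne
  | [x], b =>
    -- len(a) = 1: A returns a[0]; B's bound n = min(len b, 0) = 0, so the scan returns a[0]
    simp [logica, logica_alt, pysem]
  | x :: y :: rest, b =>
    obtain ⟨hb, hhead⟩ := h2 (by simp)
    match b with
    | [] => exact absurd rfl hb
    | op :: brest =>
      have hop : op = "and" ∨ op = "or" := by simpa using hhead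
      match rest with
      | [] =>
        -- len(a) = 2: A combines a[0], a[1] with b[0]; B's bound is min(len b, 1) = 1,
        -- so B returns the dict-dispatched base value
        rcases hop with rfl | rfl
        · have hA' : logica (x :: y :: []) ("and" :: brest) = (x && y) := by
            unfold logica
            rw [if_neg (show ¬ 2 < (x :: y :: ([] : List Bool)).length by simp),
              if_pos (show (x :: y :: ([] : List Bool)).length = 2 by simp)]
            simp [pysem]
          have gd : ((PySem.Dict.ofList [("and", x && y), ("or", x || y)]).get?
              ("and" : String)).getD false = (x && y) := by rfl
          have hB' : logica_alt (x :: y :: []) ("and" :: brest) = (x && y) := by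
            unfold logica_alt
            rw [if_neg (show ¬ (x :: y :: ([] : List Bool)).length < 2 by simp)]
            have hidx : min ("and" :: brest).length
                ((x :: y :: ([] : List Bool)).length - 1) - 1 = 0 := by
              simp only [List.length_cons, List.length_nil]
              omega
            rw [hidx]
            have g0 : PySem.List.pyGetD (x :: y :: []) 0 false = x := by simp [pysem]
            have g1 : PySem.List.pyGetD (x :: y :: []) 1 false = y := by simp [pysem]
            have gb : PySem.List.pyGetD ("and" :: brest) 0 "" = "and" := by simp [pysem]
            rw [g0, g1, gb, gd]
            rfl
          rw [hA', hB']
        · have hA' : logica (x :: y :: []) ("or" :: brest) = (x || y) := by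
            unfold logica
            rw [if_neg (show ¬ 2 < (x :: y :: ([] : List Bool)).length by simp),
              if_pos (show (x :: y :: ([] : List Bool)).length = 2 by simp)]
            simp [pysem]
          have gd : ((PySem.Dict.ofList [("and", x && y), ("or", x || y)]).get?
              ("or" : String)).getD false = (x || y) := by rfl
          have hB' : logica_alt (x :: y :: []) ("or" :: brest) = (x || y) := by
            unfold logica_alt
            rw [if_neg (show ¬ (x :: y :: ([] : List Bool)).length < 2 by simp)]
            have hidx : min ("or" :: brest).length
                ((x :: y :: ([] : List Bool)).length - 1) - 1 = 0 := by
              simp only [List.length_cons, List.length_nil]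
              omega
            rw [hidx]
            have g0 : PySem.List.pyGetD (x :: y :: []) 0 false = x := by simp [pysem]
            have g1 : PySem.List.pyGetD (x :: y :: []) 1 false = y := by simp [pysem]
            have gb : PySem.List.pyGetD ("or" :: brest) 0 "" = "or" := by simp [pysem]
            rw [g0, g1, gb, gd]
            rfl
          rw [hA', hB']
      | z :: t =>
        -- len(a) > 2
        set A := x :: y :: z :: t with hA
        set n := min (op :: brest).length (A.length - 1) with hn
        have hlb : (op :: brest).length = brest.length + 1 := by simp
        have hALen : A.length = t.length + 3 := by simp [hA]
        have hn1 : 1 ≤ n := by omega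
        have hnb : n ≤ (op :: brest).length := min_le_left _ _
        have hna : n ≤ A.length - 1 := min_le_right _ _
        have hA1 : PySem.List.pyGetD A (0 : Int) false = x := by simp [hA, pysem]
        have hA2 : PySem.List.pyGetD A (1 : Int) false = y := by simp [hA, pysem]
        have hgb : PySem.List.pyGetD (op :: brest) 0 "" = op := by simp [pysem]
        have hcond : 2 < A.length := by omega
        set r2val := (if op = "and" then x && y else if op = "or" then x || y else false)
          with hr2v
        have hstep1 : logica A (op :: brest) = logicaLoopA A brest 2 r2val := by
          unfold logica
          rw [if_pos hcond]
          simp only [PySem.List.slice_from_one, List.tail_cons, hgb, hA1, hA2]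
          congr 1
          rw [hr2v]
          rcases hop with rfl | rfl <;> simp
        have hbase0 : ((PySem.Dict.ofList
            [("and", PySem.List.pyGetD A 0 false && PySem.List.pyGetD A 1 false),
             ("or", PySem.List.pyGetD A 0 false || PySem.List.pyGetD A 1 false)]).get?
          (PySem.List.pyGetD (op :: brest) 0 "")).getD false = pvScanRef A (op :: brest) 1 := by
          rw [hgb, hA1, hA2]
          rcases hop with rfl | rfl
          · have gd : ((PySem.Dict.ofList [("and", x && y), ("or", x || y)]).get?
                ("and" : String)).getD false = (x && y) := by rfl
            rw [gd]
            cases y <;> simp [pvScanRef, pysem, hA1, hA2]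
          · have gd : ((PySem.Dict.ofList [("and", x && y), ("or", x || y)]).get?
                ("or" : String)).getD false = (x || y) := by rfl
            rw [gd]
            cases y <;> simp [pvScanRef, pysem, hA1, hA2]
        have hBalt : logica_alt A (op :: brest) = pvScanRef A (op :: brest) n := by
          unfold logica_alt
          rw [if_neg (by omega : ¬ A.length < 2), ← hn]
          exact (scanB_eq_ref A (op :: brest) _ hbase0 (n - 1)).trans
            (by rw [show n - 1 + 1 = n by omega])
        rcases hC (by omega) with htrail0 | ⟨hx, hsc⟩ | ⟨hx, hsc⟩ | ⟨j, hj, hjop, ⟨hja, hav⟩, hafter⟩ | ⟨j, hj, hjop, ⟨hja, hav⟩, hafter⟩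
        · -- no recognized trailing operator: both sides are the fold over the paired region
          have htrail : ∀ s ∈ brest.drop (n - 1), s ≠ "and" ∧ s ≠ "or" := by
            by_cases hcase : (op :: brest).length ≤ A.length - 1
            · intro s hs
              rw [List.drop_eq_nil_of_le (by omega : brest.length ≤ n - 1)] at hs
              simp at hs
            · have hnval : n = A.length - 1 := by omega
              intro s hs
              refine htrail0 s ?_
              have hdd : List.drop (A.length - 1) (op :: brest) = List.drop (n - 1) brest := by
                rw [← hnval]
                conv_lhs => rw [show n = (n - 1) + 1 by omega]
                exact List.drop_succ_cons
              rw [hdd]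
              exact hs
          have htlen : (brest.take (n - 1)).length = n - 1 := by
            simp only [List.length_take]
            omega
          have hstep2 : logicaLoopA A brest 2 r2val =
              List.foldl pvStep r2val ((brest.take (n - 1)).zip (A.drop 2)) := by
            conv_lhs => rw [← List.take_append_drop (n - 1) brest]
            rw [loopA_append, loopA_id _ _ _ _ htrail,
              loopA_eq_foldl _ _ _ _ (by rw [htlen]; omega)]
          have hBside : logica_alt A (op :: brest) =
              List.foldl pvStep x ((op :: brest.take (n - 1)).zip (A.drop 1)) := by
            rw [hBalt, scanB_eq_foldl A (op :: brest) n hnb (by omega)]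
            have htk : (op :: brest).take n = op :: brest.take (n - 1) := by
              conv_lhs => rw [show n = (n - 1) + 1 by omega]
              exact List.take_succ_cons
            rw [htk, hA1]
          rw [hstep1, hstep2, hBside]
          have hdrop1 : A.drop 1 = y :: A.drop 2 := by simp [hA]
          rw [hdrop1, List.zip_cons_cons, List.foldl_cons]
          congr 1
          rw [hr2v]
          rcases hop with rfl | rfl <;> simp [pvStep]
        · -- a[0] True and every 'and' operand True: both sides are constantly True
          have hx' : x = true := by simpa [hA] using hx
          subst hx'
          have hr2t : r2val = true := by
            rw [hr2v]
            rcases hop with rfl | rfl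
            · obtain ⟨h1, hy⟩ := hsc 0 (by simp) (by simp)
              simp only [hA, List.getElem_cons_succ, List.getElem_cons_zero] at hy
              simp [hy]
            · simp
          have hAtrue : logica A (op :: brest) = true := by
            rw [hstep1, hr2t]
            refine loopA_true A brest 2 (fun k hk hek => ?_)
            obtain ⟨hlt, hval⟩ := hsc (k + 1) (by simpa using Nat.succ_lt_succ hk)
              (by simpa using hek)
            rw [PySem.List.pyGetD_natCast, List.getD_eq_getElem _ _ (by omega : 2 + k < A.length)]
            have : 2 + k = k + 1 + 1 := by omega
            simp only [this]
            exact hval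
          have hBtrue : logica_alt A (op :: brest) = true := by
            rw [hBalt]
            refine scanB_true A (op :: brest) (by simpa using hA1) ?_ n hnb
            intro i hi hand
            rw [PySem.List.pyGetD_natCast, List.getD_eq_getElem _ _ hi] at hand
            obtain ⟨hlt, hval⟩ := hsc i hi hand
            have hcast : ((i : Int) + 1) = ((i + 1 : Nat) : Int) := by push_cast; ring
            rw [hcast, PySem.List.pyGetD_natCast, List.getD_eq_getElem _ _ hlt]
            exact hval
          rw [hAtrue, hBtrue]
        · -- a[0] False and every 'or' operand False: both sides are constantly False
          have hx' : x = false := by simpa [hA] using hx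
          subst hx'
          have hr2f : r2val = false := by
            rw [hr2v]
            rcases hop with rfl | rfl
            · simp
            · obtain ⟨h1, hy⟩ := hsc 0 (by simp) (by simp)
              simp only [hA, List.getElem_cons_succ, List.getElem_cons_zero] at hy
              simp [hy]
          have hAfalse : logica A (op :: brest) = false := by
            rw [hstep1, hr2f]
            refine loopA_false A brest 2 (fun k hk hek => ?_)
            obtain ⟨hlt, hval⟩ := hsc (k + 1) (by simpa using Nat.succ_lt_succ hk)
              (by simpa using hek)
            rw [PySem.List.pyGetD_natCast, List.getD_eq_getElem _ _ (by omega : 2 + k < A.length)]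
            have : 2 + k = k + 1 + 1 := by omega
            simp only [this]
            exact hval
          have hBfalse : logica_alt A (op :: brest) = false := by
            rw [hBalt]
            refine scanB_false A (op :: brest) (by simpa using hA1) ?_ n hnb
            intro i hi hor
            rw [PySem.List.pyGetD_natCast, List.getD_eq_getElem _ _ hi] at hor
            obtain ⟨hlt, hval⟩ := hsc i hi hor
            have hcast : ((i : Int) + 1) = ((i + 1 : Nat) : Int) := by push_cast; ring
            rw [hcast, PySem.List.pyGetD_natCast, List.getD_eq_getElem _ _ hlt]
            exact hval
          rw [hAfalse, hBfalse]
        · -- a deciding 'or'-True pair shielded on its right: both sides are True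
          have hBtrue : logica_alt A (op :: brest) = true := by
            rw [hBalt]
            exact scanB_ev_true A (op :: brest) j hj hjop hja hav hafter n (by omega) hnb
          have hAtrue : logica A (op :: brest) = true := by
            rw [hstep1]
            have hshift : ∀ k (hk : k < brest.length), j ≤ k + 1 → brest[k] = "and" →
                PySem.List.pyGetD A ((2 + k : Nat) : Int) false = true := by
              intro k hk hlt hek
              by_cases hkj : k + 1 = j
              · exfalso
                subst hkj
                have h1 : brest[k] = "or" := by simpa using hjop
                rw [hek] at h1
                simp at h1
              · obtain ⟨hlt2, hval⟩ := hafter (k + 1) (by simpa using Nat.succ_lt_succ hk)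
                  (by omega) (by simpa using hek)
                rw [PySem.List.pyGetD_natCast,
                  List.getD_eq_getElem _ _ (by omega : 2 + k < A.length)]
                have hc : 2 + k = k + 1 + 1 := by omega
                simp only [hc]
                exact hval
            cases j with
            | zero =>
              -- the deciding pair is (b[0], a[1]) = (op, y): r2val itself is True
              have hopor : op = "or" := by simpa using hjop
              subst hopor
              have hy : y = true := by simpa [hA] using hav
              have hr2t : r2val = true := by rw [hr2v]; simp [hy]
              rw [hr2t]
              exact loopA_true A brest 2 (fun k hk hek => hshift k hk (by omega) hek)
            | succ j' =>
              refine loopA_ev_true A brest 2 j' (by simpa using hj) (by simpa using hjop) ?_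
                (fun k hk hlt hek => hshift k hk (by omega) hek) r2val
              rw [PySem.List.pyGetD_natCast,
                List.getD_eq_getElem _ _ (by omega : 2 + j' < A.length)]
              have hc : 2 + j' = j' + 1 + 1 := by omega
              simp only [hc]
              exact hav
          rw [hAtrue, hBtrue]
        · -- a deciding 'and'-False pair shielded on its right: both sides are False
          have hBfalse : logica_alt A (op :: brest) = false := by
            rw [hBalt]
            exact scanB_ev_false A (op :: brest) j hj hjop hja hav hafter n (by omega) hnb
          have hAfalse : logica A (op :: brest) = false := by
            rw [hstep1]
            have hshift : ∀ k (hk : k < brest.length), j ≤ k + 1 → brest[k] = "or" →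
                PySem.List.pyGetD A ((2 + k : Nat) : Int) false = false := by
              intro k hk hlt hek
              by_cases hkj : k + 1 = j
              · exfalso
                subst hkj
                have h1 : brest[k] = "and" := by simpa using hjop
                rw [hek] at h1
                simp at h1
              · obtain ⟨hlt2, hval⟩ := hafter (k + 1) (by simpa using Nat.succ_lt_succ hk)
                  (by omega) (by simpa using hek)
                rw [PySem.List.pyGetD_natCast,
                  List.getD_eq_getElem _ _ (by omega : 2 + k < A.length)]
                have hc : 2 + k = k + 1 + 1 := by omega
                simp only [hc]
                exact hval
            cases j with
            | zero =>
              have hopand : op = "and" := by simpa using hjop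
              subst hopand
              have hy : y = false := by simpa [hA] using hav
              have hr2f : r2val = false := by rw [hr2v]; simp [hy]
              rw [hr2f]
              exact loopA_false A brest 2 (fun k hk hek => hshift k hk (by omega) hek)
            | succ j' =>
              refine loopA_ev_false A brest 2 j' (by simpa using hj) (by simpa using hjop) ?_
                (fun k hk hlt hek => hshift k hk (by omega) hek) r2val
              rw [PySem.List.pyGetD_natCast,
                List.getD_eq_getElem _ _ (by omega : 2 + j' < A.length)]
              have hc : 2 + j' = j' + 1 + 1 := by omega
              simp only [hc]
              exact hav
          rw [hAfalse, hBfalse]
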